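-- pv_equiv track=rewrite | github.com/LotifurShabbir/leetcode-Codeforces-2025 | Leetcode 2025/2975. Maximum Square Area by Removing Fences From a Field.py | maximizeSquareArea
-- ===== SOURCE A (Python) =====
-- from typing import List
--
-- def solve(arr):
--     x = set()
--     for i in range(len(arr)):
--         for j in range(i + 1, len(arr)):
--             x.add((arr[j] - arr[i]))
--     return x
--
-- def maximizeSquareArea(
--     m: int, n: int, hFences: List[int], vFences: List[int]
-- ) -> int:
--     mod = 10**9 + 7
--     hFences = [1] + hFences + [m]
--     vFences = [1] + vFences + [n]
--     hFences.sort()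
--     vFences.sort()
--     x = solve(hFences)
--     y = solve(vFences)
--     maxArea = -1
--     for i in list(x):
--         if i in y:
--             maxArea = max(maxArea, i)
--     return (maxArea**2) % mod if maxArea != -1 else -1
-- ===== SOURCE B (Python) =====
-- def maximizeSquareArea(m, n, hFences, vFences):
--     mod = 10**9 + 7
--
--     def gaps(fences, bound):
--         fs = sorted([1] + fences + [bound])
--         out = []
--         for i in range(len(fs)):
--             for j in range(i + 1, len(fs)):
--                 out.append(fs[j] - fs[i])
--         out.sort(reverse=True)
--         return out
--
--     hg = gaps(hFences, m)
--     vg = gaps(vFences, n)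
--     # two-pointer merge over the two descending gap lists: the first equal
--     # pair encountered is the largest common gap
--     i = j = 0
--     while i < len(hg) and j < len(vg):
--         if hg[i] == vg[j]:
--             return hg[i] * hg[i] % mod
--         if hg[i] > vg[j]:
--             i += 1
--         else:
--             j += 1
--     return -1
-- ===== Notes on version B (the rewrite author's own statement) =====
-- stated objective: alternative
-- what changed: B replaces A's hash-set intersection entirely: it collects each side's pairwise gaps into a list, sorts both lists in descending order, and runs a two-pointer merge over the two sorted lists, returning at the first equal pair (which is the largest common gap) -- no set is built and no membership test is done.
import Mathlib
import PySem

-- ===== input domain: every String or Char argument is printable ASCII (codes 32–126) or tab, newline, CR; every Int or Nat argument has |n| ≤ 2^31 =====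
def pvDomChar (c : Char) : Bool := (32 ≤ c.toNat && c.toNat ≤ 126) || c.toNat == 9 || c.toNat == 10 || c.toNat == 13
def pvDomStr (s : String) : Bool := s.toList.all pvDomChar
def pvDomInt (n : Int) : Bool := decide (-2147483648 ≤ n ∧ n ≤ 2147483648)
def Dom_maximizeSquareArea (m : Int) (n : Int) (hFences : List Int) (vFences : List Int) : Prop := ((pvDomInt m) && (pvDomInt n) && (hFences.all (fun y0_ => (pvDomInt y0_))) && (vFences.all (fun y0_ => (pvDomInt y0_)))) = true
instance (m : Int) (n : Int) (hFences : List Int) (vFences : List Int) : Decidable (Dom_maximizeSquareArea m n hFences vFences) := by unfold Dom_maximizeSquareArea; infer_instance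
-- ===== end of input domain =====

-- B replaces A's hash-set intersection with a sort-then-merge: both pairwise-gap lists
-- are sorted descending and intersected by a two-pointer merge that stops at the first
-- (= largest) common gap; no set and no membership test (objective: alternative).

-- ===== PORT A =====
-- helper 'solve': nested index loops adding pairwise differences to a set
def pvSolve (arr : List Int) : PySem.Set Int :=
  (PySem.List.pyRange 0 (arr.length : Int) 1).foldl (fun x i =>
    (PySem.List.pyRange (i + 1) (arr.length : Int) 1).foldl (fun x j =>
      PySem.Set.add x (PySem.List.pyGetD arr j 0 - PySem.List.pyGetD arr i 0)) x)
    PySem.Set.empty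

def maximizeSquareArea (m : Int) (n : Int) (hFences : List Int) (vFences : List Int) : Int :=
  let md : Int := 10 ^ 9 + 7
  let hF := PySem.List.sorted ([1] ++ hFences ++ [m]) (fun x => x) false
  let vF := PySem.List.sorted ([1] ++ vFences ++ [n]) (fun x => x) false
  let x := pvSolve hF
  let y := pvSolve vF
  -- 'for i in list(x): if i in y: maxArea = max(maxArea, i)' — max is iteration-order independent
  let maxArea := x.foldl (fun acc i => if PySem.Set.contains y i then max acc i else acc) (-1)
  if maxArea ≠ -1 then PySem.Int.mod (maxArea ^ 2) md else -1

-- ===== PORT B =====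
-- helper 'gaps': pad, sort ascending, collect all pairwise differences, sort descending
def pvGaps (fences : List Int) (bound : Int) : List Int :=
  let fs := PySem.List.sorted ([1] ++ fences ++ [bound]) (fun x => x) false
  PySem.List.sorted
    ((PySem.List.pyRange 0 (fs.length : Int) 1).flatMap (fun i =>
      (PySem.List.pyRange (i + 1) (fs.length : Int) 1).map (fun j =>
        PySem.List.pyGetD fs j 0 - PySem.List.pyGetD fs i 0)))
    (fun x => x) true

-- the while loop with indices i, j: advancing an index = consuming a head
def pvTwoPtr : List Int → List Int → Option Int
  | [], _ => none
  | _, [] => none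
  | a :: as, b :: bs =>
    if a = b then some a
    else if b < a then pvTwoPtr as (b :: bs)
    else pvTwoPtr (a :: as) bs
  termination_by as bs => as.length + bs.length

def maximizeSquareArea_alt (m : Int) (n : Int) (hFences : List Int) (vFences : List Int) : Int :=
  let md : Int := 10 ^ 9 + 7
  let hg := pvGaps hFences m
  let vg := pvGaps vFences n
  match pvTwoPtr hg vg with
  | some g => PySem.Int.mod (g * g) md
  | none => -1

-- ===== PRECONDITION & SPEC =====
def Spec_maximizeSquareArea (m : Int) (n : Int) (hFences : List Int) (vFences : List Int) (out : Int) : Prop := out = maximizeSquareArea_alt m n hFences vFences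
instance (m : Int) (n : Int) (hFences : List Int) (vFences : List Int) (out : Int) : Decidable (Spec_maximizeSquareArea m n hFences vFences out) := by unfold Spec_maximizeSquareArea; infer_instance

-- ===== CLAIM =====
def Claim_equal_maximizeSquareArea : Prop := ∀ (m : Int) (n : Int) (hFences : List Int) (vFences : List Int), Dom_maximizeSquareArea m n hFences vFences → Spec_maximizeSquareArea m n hFences vFences (maximizeSquareArea m n hFences vFences)

-- ===== LEMMAS AND PROOFS =====

-- the raw pairwise-gap list, common ground for both sides
def pvPairs (arr : List Int) : List Int :=
  (PySem.List.pyRange 0 (arr.length : Int) 1).flatMap (fun i =>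
    (PySem.List.pyRange (i + 1) (arr.length : Int) 1).map (fun j =>
      PySem.List.pyGetD arr j 0 - PySem.List.pyGetD arr i 0))

theorem pvPairs_eq (arr : List Int) :
    (PySem.List.pyRange 0 (arr.length : Int) 1).flatMap (fun i =>
      (PySem.List.pyRange (i + 1) (arr.length : Int) 1).map (fun j =>
        PySem.List.pyGetD arr j 0 - PySem.List.pyGetD arr i 0)) = pvPairs arr := rfl

theorem pv_mem_foldl_add (l : List Int) (s : PySem.Set Int) (g : Int) :
    g ∈ l.foldl (fun x e => PySem.Set.add x e) s ↔ g ∈ s ∨ g ∈ l := by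
  induction l generalizing s with
  | nil => simp
  | cons e t ih => simp [List.foldl_cons, ih, PySem.Set.mem_add]; tauto

theorem pv_nested_foldl {β : Type} (step : β → Int → β) (I : List Int) (J : Int → List Int)
    (f : Int → Int → Int) (a : β) :
    I.foldl (fun b i => (J i).foldl (fun b j => step b (f i j)) b) a
      = (I.flatMap (fun i => (J i).map (f i))).foldl step a := by
  induction I generalizing a with
  | nil => rfl
  | cons i t ih => simp [List.foldl_cons, List.flatMap_cons, List.foldl_append, List.foldl_map, ih]

theorem pv_mem_pvSolve (arr : List Int) (g : Int) :
    g ∈ pvSolve arr ↔ g ∈ pvPairs arr := by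
  have h := pv_nested_foldl (fun x e => PySem.Set.add x e)
    (PySem.List.pyRange 0 (arr.length : Int) 1)
    (fun i => PySem.List.pyRange (i + 1) (arr.length : Int) 1)
    (fun i j => PySem.List.pyGetD arr j 0 - PySem.List.pyGetD arr i 0)
    PySem.Set.empty
  unfold pvSolve pvPairs
  rw [h, pv_mem_foldl_add]
  simp [PySem.Set.empty]

theorem pv_condmax_eq_filter (p : Int → Bool) (l : List Int) (a : Int) :
    l.foldl (fun b e => if p e then max b e else b) a
      = (l.filter p).foldl max a := by
  induction l generalizing a with
  | nil => rfl
  | cons e t ih =>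
    by_cases hp : p e
    · simp [hp, ih]
    · simp [hp, ih]

-- every pairwise gap of an ascending-sorted list is nonnegative
theorem pv_pvPairs_nonneg (xs : List Int) (g : Int)
    (hg : g ∈ pvPairs (PySem.List.sorted xs (fun x => x) false)) : 0 ≤ g := by
  set fs := PySem.List.sorted xs (fun x => x) false with hfs
  unfold pvPairs at hg
  simp only [List.mem_flatMap, List.mem_map] at hg
  obtain ⟨i, hi, j, hj, rfl⟩ := hg
  rw [PySem.List.mem_pyRange_one] at hi hj
  have h0i : 0 ≤ i := hi.1
  have hjlen : j < (fs.length : Int) := hj.2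
  have h0j : 0 ≤ j := by omega
  rw [PySem.List.pyGetD_eq_getElem fs 0 h0j (by omega),
      PySem.List.pyGetD_eq_getElem fs 0 h0i (by omega)]
  have hmono := PySem.List.sorted_id_getElem_mono xs (p := i.toNat) (q := j.toNat)
    (by omega) (by rw [← hfs]; omega)
  exact sub_nonneg.2 hmono
-- two-pointer merge on descending lists: a `some` result is a common element
-- and an upper bound of all common elements …
theorem pv_twoPtr_some (as bs : List Int)
    (ha : as.Pairwise (fun x y => y ≤ x)) (hb : bs.Pairwise (fun x y => y ≤ x))
    (g : Int) (h : pvTwoPtr as bs = some g) :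
    g ∈ as ∧ g ∈ bs ∧ ∀ x, x ∈ as → x ∈ bs → x ≤ g := by
  fun_induction pvTwoPtr as bs with
  | case1 _ => exact absurd h (by simp)
  | case2 _ _ => exact absurd h (by simp)
  | case3 as b bs =>
    obtain rfl : b = g := by injection h
    refine ⟨List.mem_cons_self, List.mem_cons_self, ?_⟩
    intro x hx _
    rcases List.mem_cons.1 hx with rfl | hx
    · exact le_refl x
    · exact (List.pairwise_cons.1 ha).1 x hx
  | case4 a as b bs hne hba ih =>
    obtain ⟨h1, h2, h3⟩ := ih (List.pairwise_cons.1 ha).2 hb h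
    refine ⟨List.mem_cons_of_mem _ h1, h2, ?_⟩
    intro x hx hxb
    rcases List.mem_cons.1 hx with rfl | hx
    · exfalso
      rcases List.mem_cons.1 hxb with rfl | hxb
      · omega
      · have := (List.pairwise_cons.1 hb).1 x hxb
        omega
    · exact h3 x hx hxb
  | case5 a as b bs hne hba ih =>
    obtain ⟨h1, h2, h3⟩ := ih ha (List.pairwise_cons.1 hb).2 h
    refine ⟨h1, List.mem_cons_of_mem _ h2, ?_⟩
    intro x hx hxb
    rcases List.mem_cons.1 hxb with rfl | hxb
    · exfalso
      rcases List.mem_cons.1 hx with rfl | hx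
      · omega
      · have := (List.pairwise_cons.1 ha).1 x hx
        omega
    · exact h3 x hx hxb

-- … and a `none` result means there is no common element
theorem pv_twoPtr_none (as bs : List Int)
    (ha : as.Pairwise (fun x y => y ≤ x)) (hb : bs.Pairwise (fun x y => y ≤ x))
    (h : pvTwoPtr as bs = none) :
    ∀ x, x ∈ as → x ∉ bs := by
  fun_induction pvTwoPtr as bs with
  | case1 _ => simp
  | case2 _ _ => simp
  | case3 as b bs => exact absurd h (by simp)
  | case4 a as b bs hne hba ih =>
    have ih' := ih (List.pairwise_cons.1 ha).2 hb h
    intro x hx hxb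
    rcases List.mem_cons.1 hx with rfl | hx
    · rcases List.mem_cons.1 hxb with rfl | hxb
      · omega
      · have := (List.pairwise_cons.1 hb).1 x hxb
        omega
    · exact ih' x hx hxb
  | case5 a as b bs hne hba ih =>
    have ih' := ih ha (List.pairwise_cons.1 hb).2 h
    intro x hx hxb
    rcases List.mem_cons.1 hxb with rfl | hxb
    · rcases List.mem_cons.1 hx with rfl | hx
      · omega
      · have := (List.pairwise_cons.1 ha).1 x hx
        omega
    · exact ih' x hx hxb

theorem maximizeSquareArea_eq (m : Int) (n : Int) (hFences : List Int) (vFences : List Int) :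
    maximizeSquareArea m n hFences vFences = maximizeSquareArea_alt m n hFences vFences := by
  unfold maximizeSquareArea maximizeSquareArea_alt pvGaps
  dsimp only
  simp only [pvPairs_eq]
  set hs := PySem.List.sorted ([1] ++ hFences ++ [m]) (fun x => x) false with hhs
  set vs := PySem.List.sorted ([1] ++ vFences ++ [n]) (fun x => x) false with hvs
  set hg := PySem.List.sorted (pvPairs hs) (fun x => x) true with hhg
  set vg := PySem.List.sorted (pvPairs vs) (fun x => x) true with hvg
  have hga : hg.Pairwise (fun x y => y ≤ x) := PySem.List.sorted_pairwise_rev _ _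
  have hgb : vg.Pairwise (fun x y => y ≤ x) := PySem.List.sorted_pairwise_rev _ _
  have hmemh : ∀ x, x ∈ hg ↔ x ∈ pvPairs hs := fun x => PySem.List.mem_sorted _ _ _ _
  have hmemv : ∀ x, x ∈ vg ↔ x ∈ pvPairs vs := fun x => PySem.List.mem_sorted _ _ _ _
  -- the filtered list A's loop maximises over
  set L := (pvSolve hs).filter (fun g => PySem.Set.contains (pvSolve vs) g) with hL
  have hA : (pvSolve hs).foldl
      (fun acc i => if PySem.Set.contains (pvSolve vs) i then max acc i else acc) (-1)
      = L.foldl max (-1) := pv_condmax_eq_filter _ _ _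
  have hmemL : ∀ x, x ∈ L ↔ (x ∈ pvPairs hs ∧ x ∈ pvPairs vs) := by
    intro x
    rw [hL, List.mem_filter, pv_mem_pvSolve]
    constructor
    · rintro ⟨h1, h2⟩
      exact ⟨h1, (pv_mem_pvSolve _ _).1 ((PySem.Set.contains_iff _ _).1 h2)⟩
    · rintro ⟨h1, h2⟩
      exact ⟨h1, (PySem.Set.contains_iff _ _).2 ((pv_mem_pvSolve _ _).2 h2)⟩
  rw [hA]
  set r := L.foldl max (-1) with hr
  have hrmem : r = -1 ∨ r ∈ L := PySem.List.foldl_max_mem L (-1)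
  have hrub : ∀ y ∈ L, y ≤ r := (PySem.List.le_foldl_max L (-1)).2
  cases hptr : pvTwoPtr hg vg with
  | some g =>
    obtain ⟨h1, h2, h3⟩ := pv_twoPtr_some hg vg hga hgb g hptr
    rw [hmemh] at h1; rw [hmemv] at h2
    have hgL : g ∈ L := (hmemL g).2 ⟨h1, h2⟩
    have hg0 : 0 ≤ g := pv_pvPairs_nonneg _ _ (hhs ▸ h1)
    have hgr : g ≤ r := hrub g hgL
    have hrne : r ≠ -1 := by omega
    have hrL : r ∈ L := hrmem.resolve_left hrne
    obtain ⟨hr1, hr2⟩ := (hmemL r).1 hrL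
    have hrg : r ≤ g := h3 r ((hmemh r).2 hr1) ((hmemv r).2 hr2)
    have hreq : r = g := le_antisymm hrg hgr
    rw [if_pos hrne, hreq, pow_two]
  | none =>
    have hno := pv_twoPtr_none hg vg hga hgb hptr
    have hLnil : L = [] := by
      rcases L.eq_nil_or_concat with h | ⟨t, x, hx⟩
      · exact h
      · exfalso
        have hxL : x ∈ L := by rw [hx]; simp
        obtain ⟨hx1, hx2⟩ := (hmemL x).1 hxL
        exact hno x ((hmemh x).2 hx1) ((hmemv x).2 hx2)
    have hrneg : r = -1 := by rw [hr, hLnil]; rfl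
    rw [hrneg, if_neg (by omega)]

-- ===== VERDICT =====
theorem maximizeSquareArea_spec : Claim_equal_maximizeSquareArea := by
  intro m n hFences vFences _
  unfold Spec_maximizeSquareArea
  exact maximizeSquareArea_eq m n hFences vFences
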